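-- pv_equiv track=rewrite | github.com/MrBrantCode/unitest_baseline | mut_generate/mist_train_taco/taco_9912/solution.py | calculate_tan_n_alpha
-- ===== SOURCE A (Python) =====
-- def calculate_tan_n_alpha(p: int, q: int, n: int, P: int = 10**9 + 7) -> int:
--     """
--     Calculate tan(nα) modulo P given tan(α) = p/q.
--
--     Parameters:
--     p (int): Numerator of tan(α).
--     q (int): Denominator of tan(α).
--     n (int): The power of α.
--     P (int): The modulo value (default is 10^9 + 7).
--
--     Returns:
--     int: The result of tan(nα) modulo P.
--     """
--
--     def mul(a, b):
--         return ((a[0] * b[0] - a[1] * b[1]) % P, (a[0] * b[1] + a[1] * b[0]) % P)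
--
--     def my_pow(a, b):
--         ret = (1, 0)
--         while b > 0:
--             if b & 1 == 1:
--                 ret = mul(ret, a)
--             a = mul(a, a)
--             b >>= 1
--         return ret
--
--     a = my_pow((q, p), n)
--     return a[1] * pow(a[0], P - 2, P) % P
-- ===== SOURCE B (Python) =====
-- def calculate_tan_n_alpha(p: int, q: int, n: int, P: int = 10**9 + 7) -> int:
--     """tan(n*alpha) mod P for tan(alpha) = p/q: left-to-right (MSB-first) binary
--     exponentiation over an explicit bit list for (q + p*i)^n, and the modular
--     inverse of the real part computed by the same MSB-first scheme (Fermat)."""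
--
--     def mul(a, b):
--         return ((a[0] * b[0] - a[1] * b[1]) % P, (a[0] * b[1] + a[1] * b[0]) % P)
--
--     def bits(m):
--         return bits(m >> 1) + [m & 1] if m > 0 else []
--
--     re, im = 1, 0
--     for bit in bits(n):
--         re, im = mul((re, im), (re, im))
--         if bit:
--             re, im = mul((re, im), (q, p))
--
--     inv = 1
--     for bit in bits(P - 2):
--         inv = inv * inv % P
--         if bit:
--             inv = inv * re % P
--
--     return im * inv % P
-- ===== Notes on version B (the rewrite author's own statement) =====
-- stated objective: alternative
-- what changed: A's right-to-left iterative bit loop (accumulator times repeatedly squared base) is replaced by left-to-right binary exponentiation: the exponent is first decomposed into an explicit MSB-first bit list, then a fold squares the result and conditionally multiplies in the fixed base; the same scheme also replaces the builtin pow for the Fermat inverse of the real part.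
-- outside the precondition, e.g. on calculate_tan_n_alpha(-5, -5, 3, -7): A returns -2, B returns -5; on calculate_tan_n_alpha(1, 2, 3, 0): A raises ZeroDivisionError, B raises ZeroDivisionError
import Mathlib
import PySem

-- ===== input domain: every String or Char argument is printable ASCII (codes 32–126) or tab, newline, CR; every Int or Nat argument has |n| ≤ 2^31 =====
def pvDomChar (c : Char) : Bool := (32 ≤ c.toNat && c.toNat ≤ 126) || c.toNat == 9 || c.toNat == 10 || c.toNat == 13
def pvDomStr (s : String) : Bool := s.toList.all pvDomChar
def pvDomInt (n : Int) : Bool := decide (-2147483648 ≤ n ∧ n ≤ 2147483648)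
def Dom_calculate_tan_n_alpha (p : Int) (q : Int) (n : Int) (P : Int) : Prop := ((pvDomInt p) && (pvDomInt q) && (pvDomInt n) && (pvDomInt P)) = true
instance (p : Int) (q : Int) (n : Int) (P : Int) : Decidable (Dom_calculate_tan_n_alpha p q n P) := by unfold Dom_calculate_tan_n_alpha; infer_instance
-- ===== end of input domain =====

-- B replaces A's right-to-left accumulator bit loop (and the builtin pow for the Fermat
-- inverse) by left-to-right binary exponentiation over an explicit MSB-first bit list;
-- same cost, a different algorithmic decomposition.

-- ===== PORT A =====

-- the modular complex multiply `mul` (identical helper in A and B)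
def pvMul (P : Int) (a b : Int × Int) : Int × Int :=
  (PySem.Int.mod (a.1 * b.1 - a.2 * b.2) P, PySem.Int.mod (a.1 * b.2 + a.2 * b.1) P)

-- A-side helper: Python's builtin pow(b, e, m) for e ≥ 0, m > 0 (all inputs Pre_ admits),
-- by binary exponentiation (PySem.Int.powMod computes b^e first, infeasible at P ≈ 2^31)
def pvPowMod (b : Int) (e : Nat) (m : Int) : Int :=
  if e = 0 then PySem.Int.mod 1 m
  else
    let h := pvPowMod b (e / 2) m
    let s := PySem.Int.mod (h * h) m
    if e % 2 = 1 then PySem.Int.mod (s * b) m else s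
termination_by e
decreasing_by omega

-- A's `my_pow`: while b > 0: if b&1: ret = mul(ret, a); a = mul(a, a); b >>= 1
def myPowA (P : Int) (a : Int × Int) (b : Int) (ret : Int × Int) : Int × Int :=
  if 0 < b then
    myPowA P (pvMul P a a) (b / 2) (if b % 2 = 1 then pvMul P ret a else ret)
  else ret
termination_by b.toNat
decreasing_by omega

def calculate_tan_n_alpha (p : Int) (q : Int) (n : Int) (P : Int) : Int :=
  let a := myPowA P (q, p) n (1, 0)
  PySem.Int.mod (a.2 * pvPowMod a.1 (P - 2).toNat P) P

-- ===== PORT B =====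

-- B's `bits`: bits(m) = bits(m >> 1) + [m & 1] if m > 0 else []   (MSB-first bit list)
def pvBits (m : Int) : List Bool :=
  if h : 0 < m then pvBits (m / 2) ++ [decide (m % 2 = 1)] else []
termination_by m.toNat
decreasing_by omega

def calculate_tan_n_alpha_alt (p : Int) (q : Int) (n : Int) (P : Int) : Int :=
  -- for bit in bits(n): square, and if bit multiply by (q, p)
  let a := (pvBits n).foldl
    (fun r bit => let s := pvMul P r r; if bit then pvMul P s (q, p) else s)
    ((1 : Int), (0 : Int))
  -- for bit in bits(P-2): inv = inv*inv % P; if bit: inv = inv*re % P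
  let inv := (pvBits (P - 2)).foldl
    (fun r bit => let s := PySem.Int.mod (r * r) P; if bit then PySem.Int.mod (s * a.1) P else s)
    (1 : Int)
  PySem.Int.mod (a.2 * inv) P

-- ===== PRECONDITION & SPEC =====
-- Pre_ excludes P ≤ 0: there the exponent P-2 is negative and the modulus non-positive, so
-- Python's pow raises ZeroDivisionError for P = 0 and ValueError whenever the base is not
-- invertible mod P, and on the residual P < 0 inputs A's negative-modulus inverse is a
-- corner B's Fermat scheme does not reproduce.
def Pre_calculate_tan_n_alpha (p : Int) (q : Int) (n : Int) (P : Int) : Prop := 1 ≤ P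
instance (p : Int) (q : Int) (n : Int) (P : Int) : Decidable (Pre_calculate_tan_n_alpha p q n P) := by unfold Pre_calculate_tan_n_alpha; infer_instance

def pvWitness_calculate_tan_n_alpha : Int × Int × Int × Int := (1, 2, 3, 7)

def Spec_calculate_tan_n_alpha (p : Int) (q : Int) (n : Int) (P : Int) (out : Int) : Prop := out = calculate_tan_n_alpha_alt p q n P
instance (p : Int) (q : Int) (n : Int) (P : Int) (out : Int) : Decidable (Spec_calculate_tan_n_alpha p q n P out) := by unfold Spec_calculate_tan_n_alpha; infer_instance

-- ===== CLAIM (what is proved, stated in full; the proofs are below) =====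
def Claim_equal_calculate_tan_n_alpha : Prop := ∀ (p : Int) (q : Int) (n : Int) (P : Int), Dom_calculate_tan_n_alpha p q n P → Pre_calculate_tan_n_alpha p q n P → Spec_calculate_tan_n_alpha p q n P (calculate_tan_n_alpha p q n P)

-- ===== LEMMAS AND PROOFS =====

-- exact (un-reduced) complex multiplication and power, the common specification
def cmul (x y : Int × Int) : Int × Int := (x.1 * y.1 - x.2 * y.2, x.1 * y.2 + x.2 * y.1)

def cpow (a : Int × Int) : Nat → Int × Int
  | 0 => (1, 0)
  | k + 1 => cmul a (cpow a k)

-- proof-side recursive form of B's left-to-right fold over pvBits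
def myPowB (P : Int) (a : Int × Int) (b : Int) : Int × Int :=
  if b ≤ 0 then (1, 0)
  else
    let half := myPowB P a (b / 2)
    let s := pvMul P half half
    if b % 2 = 1 then pvMul P s a else s
termination_by b.toNat
decreasing_by omega

-- proof-side recursive form of B's scalar (Fermat-inverse) fold
def spowB (P : Int) (b : Int) (m : Int) : Int :=
  if m ≤ 0 then 1
  else
    let h := spowB P b (m / 2)
    let s := PySem.Int.mod (h * h) P
    if m % 2 = 1 then PySem.Int.mod (s * b) P else s
termination_by m.toNat
decreasing_by omega

-- componentwise congruence mod P, and "both components already reduced mod P"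
def CEq (P : Int) (x y : Int × Int) : Prop := x.1 % P = y.1 % P ∧ x.2 % P = y.2 % P

def Red (P : Int) (x : Int × Int) : Prop := x.1 % P = x.1 ∧ x.2 % P = x.2

theorem ceq_refl (P : Int) (x : Int × Int) : CEq P x x := ⟨rfl, rfl⟩

theorem ceq_symm {P : Int} {x y : Int × Int} (h : CEq P x y) : CEq P y x := ⟨h.1.symm, h.2.symm⟩

theorem ceq_trans {P : Int} {x y z : Int × Int} (h : CEq P x y) (h' : CEq P y z) : CEq P x z :=
  ⟨h.1.trans h'.1, h.2.trans h'.2⟩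

theorem cmul_congr {P : Int} {x x' y y' : Int × Int} (hx : CEq P x x') (hy : CEq P y y') :
    CEq P (cmul x y) (cmul x' y') := by
  have h1 : Int.ModEq P x.1 x'.1 := hx.1
  have h2 : Int.ModEq P x.2 x'.2 := hx.2
  have h3 : Int.ModEq P y.1 y'.1 := hy.1
  have h4 : Int.ModEq P y.2 y'.2 := hy.2
  exact ⟨(h1.mul h3).sub (h2.mul h4), (h1.mul h4).add (h2.mul h3)⟩

theorem cpow_congr {P : Int} {a a' : Int × Int} (h : CEq P a a') (k : Nat) :
    CEq P (cpow a k) (cpow a' k) := by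
  induction k with
  | zero => exact ceq_refl _ _
  | succ k ih => exact cmul_congr h ih

theorem cmul_comm (x y : Int × Int) : cmul x y = cmul y x := by
  simp only [cmul, Prod.mk.injEq]; constructor <;> ring

theorem cmul_assoc (x y z : Int × Int) : cmul (cmul x y) z = cmul x (cmul y z) := by
  simp only [cmul, Prod.mk.injEq]; constructor <;> ring

theorem cmul_one_left (x : Int × Int) : cmul (1, 0) x = x := by
  simp [cmul]

theorem cmul_one_right (x : Int × Int) : cmul x (1, 0) = x := by
  simp [cmul]

theorem cpow_sq (a : Int × Int) (k : Nat) : cpow (cmul a a) k = cpow a (2 * k) := by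
  induction k with
  | zero => rfl
  | succ k ih =>
    have h2 : 2 * (k + 1) = (2 * k + 1) + 1 := by ring
    rw [h2]
    show cmul (cmul a a) (cpow (cmul a a) k) = cmul a (cpow a (2 * k + 1))
    rw [ih]
    show _ = cmul a (cmul a (cpow a (2 * k)))
    rw [← cmul_assoc]

theorem cpow_add (a : Int × Int) (i j : Nat) : cpow a (i + j) = cmul (cpow a i) (cpow a j) := by
  induction i with
  | zero =>
    rw [Nat.zero_add]
    show cpow a j = cmul (1, 0) (cpow a j)
    rw [cmul_one_left]
  | succ i ih =>
    have h : i + 1 + j = (i + j) + 1 := by omega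
    rw [h]
    show cmul a (cpow a (i + j)) = cmul (cmul a (cpow a i)) (cpow a j)
    rw [ih, ← cmul_assoc]

-- pvMul is cmul followed by componentwise reduction (for positive modulus)
theorem pvMul_eq {P : Int} (hP : 0 < P) (x y : Int × Int) :
    pvMul P x y = ((cmul x y).1 % P, (cmul x y).2 % P) := by
  simp [pvMul, cmul, PySem.Int.mod_eq_emod_of_pos hP]

theorem ceq_reduce (P : Int) (x : Int × Int) : CEq P (x.1 % P, x.2 % P) x :=
  ⟨Int.emod_emod_of_dvd _ dvd_rfl, Int.emod_emod_of_dvd _ dvd_rfl⟩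

theorem pvMul_ceq {P : Int} (hP : 0 < P) (x y : Int × Int) : CEq P (pvMul P x y) (cmul x y) := by
  rw [pvMul_eq hP]; exact ceq_reduce P (cmul x y)

theorem red_pvMul {P : Int} (hP : 0 < P) (x y : Int × Int) : Red P (pvMul P x y) := by
  rw [pvMul_eq hP]
  exact ⟨Int.emod_emod_of_dvd _ dvd_rfl, Int.emod_emod_of_dvd _ dvd_rfl⟩

-- the loop invariant of A: the accumulator times the exact power, reduced mod P
theorem myPowA_inv {P : Int} (hP : 0 < P) :
    ∀ (k : Nat) (a ret : Int × Int) (b : Int), b.toNat ≤ k →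
      CEq P (myPowA P a b ret) (cmul ret (cpow a b.toNat)) := by
  intro k
  induction k with
  | zero =>
    intro a ret b hb
    have h : ¬ 0 < b := by omega
    rw [myPowA, if_neg h]
    have hb0 : b.toNat = 0 := by omega
    rw [hb0]
    show CEq P ret (cmul ret (1, 0))
    rw [cmul_one_right]; exact ceq_refl _ _
  | succ k ih =>
    intro a ret b hb
    by_cases h : 0 < b
    · rw [myPowA, if_pos h]
      have hm : (b / 2).toNat ≤ k := by omega
      have hIH := ih (pvMul P a a) (if b % 2 = 1 then pvMul P ret a else ret) (b / 2) hm
      refine ceq_trans hIH ?_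
      have hsq : CEq P (cpow (pvMul P a a) (b / 2).toNat) (cpow a (2 * (b / 2).toNat)) := by
        rw [← cpow_sq]; exact cpow_congr (pvMul_ceq hP a a) _
      by_cases hodd : b % 2 = 1
      · rw [if_pos hodd]
        have hbt : b.toNat = 2 * (b / 2).toNat + 1 := by omega
        rw [hbt]
        refine ceq_trans (cmul_congr (pvMul_ceq hP ret a) hsq) ?_
        show CEq P (cmul (cmul ret a) (cpow a (2 * (b / 2).toNat))) (cmul ret (cmul a (cpow a (2 * (b / 2).toNat))))
        rw [cmul_assoc]; exact ceq_refl _ _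
      · rw [if_neg hodd]
        have hbt : b.toNat = 2 * (b / 2).toNat := by omega
        rw [hbt]
        exact cmul_congr (ceq_refl _ _) hsq
    · rw [myPowA, if_neg h]
      have hb0 : b.toNat = 0 := by omega
      rw [hb0]
      show CEq P ret (cmul ret (1, 0))
      rw [cmul_one_right]; exact ceq_refl _ _

-- the invariant of B's complex part: the exact power, reduced mod P
theorem myPowB_inv {P : Int} (hP : 0 < P) :
    ∀ (k : Nat) (a : Int × Int) (b : Int), b.toNat ≤ k →
      CEq P (myPowB P a b) (cpow a b.toNat) := by
  intro k
  induction k with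
  | zero =>
    intro a b hb
    have h : b ≤ 0 := by omega
    rw [myPowB, if_pos h]
    have hb0 : b.toNat = 0 := by omega
    rw [hb0]; exact ceq_refl _ _
  | succ k ih =>
    intro a b hb
    by_cases h : b ≤ 0
    · rw [myPowB, if_pos h]
      have hb0 : b.toNat = 0 := by omega
      rw [hb0]; exact ceq_refl _ _
    · rw [myPowB, if_neg h]
      have hm : (b / 2).toNat ≤ k := by omega
      have hIH := ih a (b / 2) hm
      have hsq : CEq P (pvMul P (myPowB P a (b / 2)) (myPowB P a (b / 2))) (cpow a (2 * (b / 2).toNat)) := by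
        refine ceq_trans (pvMul_ceq hP _ _) ?_
        refine ceq_trans (cmul_congr hIH hIH) ?_
        rw [two_mul, cpow_add]
        exact ceq_refl _ _
      by_cases hodd : b % 2 = 1
      · simp only [if_pos hodd]
        have hbt : b.toNat = 2 * (b / 2).toNat + 1 := by omega
        rw [hbt]
        refine ceq_trans (pvMul_ceq hP _ _) ?_
        refine ceq_trans (cmul_congr hsq (ceq_refl P a)) ?_
        show CEq P (cmul (cpow a (2 * (b / 2).toNat)) a) (cmul a (cpow a (2 * (b / 2).toNat)))
        rw [cmul_comm]; exact ceq_refl _ _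
      · simp only [if_neg hodd]
        have hbt : b.toNat = 2 * (b / 2).toNat := by omega
        rw [hbt]; exact hsq

-- for positive exponent both loops end with a pvMul, so both results are reduced mod P
theorem myPowA_red {P : Int} (hP : 0 < P) :
    ∀ (k : Nat) (a ret : Int × Int) (b : Int), b.toNat ≤ k → 0 < b →
      Red P (myPowA P a b ret) := by
  intro k
  induction k with
  | zero => intro a ret b hb h; omega
  | succ k ih =>
    intro a ret b hb h
    rw [myPowA, if_pos h]
    by_cases h2 : 0 < b / 2
    · exact ih _ _ _ (by omega) h2
    · have hb1 : b = 1 := by omega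
      subst hb1
      rw [myPowA, if_neg (by omega : ¬ (0:Int) < 1 / 2)]
      rw [if_pos (by decide : (1:Int) % 2 = 1)]
      exact red_pvMul hP ret a

theorem myPowB_red {P : Int} (hP : 0 < P) (a : Int × Int) (b : Int) (h : 0 < b) :
    Red P (myPowB P a b) := by
  rw [myPowB, if_neg (by omega : ¬ b ≤ 0)]
  by_cases hodd : b % 2 = 1
  · rw [if_pos hodd]; exact red_pvMul hP _ _
  · rw [if_neg hodd]; exact red_pvMul hP _ _

-- A's loop and the recursive form of B's complex fold compute the same pair
theorem myPow_key {P : Int} (hP : 0 < P) (a : Int × Int) (b : Int) :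
    myPowA P a b (1, 0) = myPowB P a b := by
  by_cases h : 0 < b
  · have hA := myPowA_inv hP b.toNat a (1, 0) b le_rfl
    rw [cmul_one_left] at hA
    have hB := myPowB_inv hP b.toNat a b le_rfl
    have hAB := ceq_trans hA (ceq_symm hB)
    have rA := myPowA_red hP b.toNat a (1, 0) b le_rfl h
    have rB := myPowB_red hP a b h
    have e1 := hAB.1
    have e2 := hAB.2
    rw [rA.1, rB.1] at e1
    rw [rA.2, rB.2] at e2
    exact Prod.ext e1 e2
  · rw [myPowA, if_neg h, myPowB, if_pos (by omega : b ≤ 0)]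

-- B's complex fold over the MSB-first bit list equals the recursive form
theorem cfold_eq (P q p : Int) :
    ∀ (k : Nat) (m : Int), m.toNat ≤ k →
      (pvBits m).foldl
        (fun r bit => let s := pvMul P r r; if bit then pvMul P s (q, p) else s)
        ((1 : Int), (0 : Int)) = myPowB P (q, p) m := by
  intro k
  induction k with
  | zero =>
    intro m hm
    have h : ¬ 0 < m := by omega
    rw [pvBits, dif_neg h, myPowB, if_pos (by omega : m ≤ 0)]
    rfl
  | succ k ih =>
    intro m hm
    by_cases h : 0 < m
    · rw [pvBits, dif_pos h, List.foldl_append, ih (m / 2) (by omega)]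
      conv_rhs => rw [myPowB]
      rw [if_neg (by omega : ¬ m ≤ 0)]
      by_cases hodd : m % 2 = 1
      · simp only [hodd, List.foldl, decide_true, if_true]
      · simp only [List.foldl, hodd]
        simp
    · rw [pvBits, dif_neg h, myPowB, if_pos (by omega : m ≤ 0)]
      rfl

-- B's scalar fold over the MSB-first bit list equals the recursive form
theorem sfold_eq (P b : Int) :
    ∀ (k : Nat) (m : Int), m.toNat ≤ k →
      (pvBits m).foldl
        (fun r bit => let s := PySem.Int.mod (r * r) P; if bit then PySem.Int.mod (s * b) P else s)
        (1 : Int) = spowB P b m := by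
  intro k
  induction k with
  | zero =>
    intro m hm
    have h : ¬ 0 < m := by omega
    rw [pvBits, dif_neg h, spowB, if_pos (by omega : m ≤ 0)]
    rfl
  | succ k ih =>
    intro m hm
    by_cases h : 0 < m
    · rw [pvBits, dif_pos h, List.foldl_append, ih (m / 2) (by omega)]
      conv_rhs => rw [spowB]
      rw [if_neg (by omega : ¬ m ≤ 0)]
      by_cases hodd : m % 2 = 1
      · simp only [hodd, List.foldl, decide_true, if_true]
      · simp only [List.foldl, hodd]
        simp
    · rw [pvBits, dif_neg h, spowB, if_pos (by omega : m ≤ 0)]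
      rfl

-- (x * y) % P only depends on x through x % P
theorem mulEmodLeftCongr {P x x' y : Int} (h : x % P = x' % P) :
    (x * y) % P = (x' * y) % P := by
  rw [Int.mul_emod, h, ← Int.mul_emod]

-- Python's pow(b, e, m) computes exactly b^e % m (positive modulus)
theorem pvPowMod_closed (b P : Int) (hP : 0 < P) :
    ∀ (k : Nat) (e : Nat), e ≤ k → pvPowMod b e P = (b ^ e) % P := by
  intro k
  induction k with
  | zero =>
    intro e he
    have h0 : e = 0 := by omega
    subst h0
    rw [pvPowMod, if_pos rfl, PySem.Int.mod_eq_emod_of_pos hP, pow_zero]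
  | succ k ih =>
    intro e he
    by_cases h0 : e = 0
    · subst h0
      rw [pvPowMod, if_pos rfl, PySem.Int.mod_eq_emod_of_pos hP, pow_zero]
    · rw [pvPowMod, if_neg h0]
      simp only [PySem.Int.mod_eq_emod_of_pos hP]
      rw [ih (e / 2) (by omega)]
      have hsq : (b ^ (e / 2) % P * (b ^ (e / 2) % P)) % P = b ^ (e / 2 + e / 2) % P := by
        rw [← Int.mul_emod, pow_add]
      by_cases hodd : e % 2 = 1
      · rw [if_pos hodd, hsq]
        have hc : (b ^ (e / 2 + e / 2) % P * b) % P = (b ^ (e / 2 + e / 2) * b) % P :=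
          mulEmodLeftCongr (Int.emod_emod_of_dvd _ dvd_rfl)
        rw [hc, ← pow_succ, (by omega : e / 2 + e / 2 + 1 = e)]
      · rw [if_neg hodd, hsq]
        have he2 : e / 2 + e / 2 = e := by omega
        rw [he2]

-- B's scalar recursion also computes b^m % P when 1 ≤ m
theorem spowB_closed (b P : Int) (hP : 0 < P) :
    ∀ (k : Nat) (m : Int), m.toNat ≤ k → 1 ≤ m → spowB P b m = (b ^ m.toNat) % P := by
  intro k
  induction k with
  | zero => intro m hm h1; omega
  | succ k ih =>
    intro m hm h1
    rw [spowB, if_neg (by omega : ¬ m ≤ 0)]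
    simp only [PySem.Int.mod_eq_emod_of_pos hP]
    by_cases h2 : 1 ≤ m / 2
    · rw [ih (m / 2) (by omega) h2]
      have hsq : (b ^ (m / 2).toNat % P * (b ^ (m / 2).toNat % P)) % P
          = b ^ ((m / 2).toNat + (m / 2).toNat) % P := by
        rw [← Int.mul_emod, pow_add]
      by_cases hodd : m % 2 = 1
      · rw [if_pos hodd, hsq]
        have hc : (b ^ ((m / 2).toNat + (m / 2).toNat) % P * b) % P
            = (b ^ ((m / 2).toNat + (m / 2).toNat) * b) % P :=
          mulEmodLeftCongr (Int.emod_emod_of_dvd _ dvd_rfl)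
        rw [hc, ← pow_succ, (by omega : (m / 2).toNat + (m / 2).toNat + 1 = m.toNat)]
      · rw [if_neg hodd, hsq]
        have hm2 : (m / 2).toNat + (m / 2).toNat = m.toNat := by omega
        rw [hm2]
    · -- here m = 1: the inner call returns the seed 1, then one square and one multiply
      have hm1 : m = 1 := by omega
      subst hm1
      rw [spowB, if_pos (by decide : (1:Int) / 2 ≤ 0)]
      rw [if_pos (by decide : (1:Int) % 2 = 1)]
      have hc : ((1:Int) * 1 % P * b) % P = ((1:Int) * b) % P :=
        mulEmodLeftCongr (by norm_num [Int.emod_emod_of_dvd])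
      rw [hc]
      norm_num

-- ===== VERDICT (by name: the statement is the Claim_ definition above) =====
theorem calculate_tan_n_alpha_spec : Claim_equal_calculate_tan_n_alpha := by
  intro p q n P _ hPre
  unfold Spec_calculate_tan_n_alpha
  simp only [calculate_tan_n_alpha, calculate_tan_n_alpha_alt]
  have hP : (0:Int) < P := by unfold Pre_calculate_tan_n_alpha at hPre; omega
  rw [cfold_eq P q p n.toNat n le_rfl,
    sfold_eq P (myPowB P (q, p) n).1 (P - 2).toNat (P - 2) le_rfl,
    myPow_key hP]
  simp only [PySem.Int.mod_eq_emod_of_pos hP]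
  by_cases h3 : 1 ≤ P - 2
  · rw [spowB_closed _ _ hP (P - 2).toNat (P - 2) le_rfl h3,
      pvPowMod_closed _ _ hP (P - 2).toNat (P - 2).toNat le_rfl]
  · have he : (P - 2).toNat = 0 := by omega
    rw [he, pvPowMod, if_pos rfl, spowB, if_pos (by omega : P - 2 ≤ 0)]
    rw [PySem.Int.mod_eq_emod_of_pos hP]
    rw [mul_comm _ ((1:Int) % P), mul_comm _ (1:Int)]
    exact mulEmodLeftCongr (Int.emod_emod_of_dvd 1 dvd_rfl)
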